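-- pv_equiv track=rewrite | github.com/PolyDataLab/CourseEnrollmentPred | Predict_from_Classifier/LR/Logistic_regression.py | calculate_term_dict_true
-- ===== SOURCE A (Python) =====
-- def calculate_term_dict_true(term_dict_true, semester, t_basket, pred_basket):
--     for item in pred_basket:
--         if item in t_basket:
--             if semester not in term_dict_true:
--                 count_course = {}
--             else:
--                 count_course = term_dict_true[semester]
--             if item not in count_course:
--                 count_course[item] = 1
--             else:
--                 count_course[item] = count_course[item] + 1
--             term_dict_true[semester] = count_course
--     return term_dict_true
-- ===== SOURCE B (Python) =====
-- def calculate_term_dict_true(term_dict_true, semester, t_basket, pred_basket):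
--     # Filter-tabulate-merge with a set for membership: count the matched
--     # predictions once, then merge the table into the semester dict in one
--     # write-back.  (Like A, mutates term_dict_true / its inner dict in place.)
--     ts = set(t_basket)
--     matched = [i for i in pred_basket if i in ts]
--     if not matched:
--         return term_dict_true
--     freq = {}
--     for i in matched:
--         freq[i] = freq.get(i, 0) + 1
--     counts = term_dict_true.get(semester, {})
--     for item, c in freq.items():
--         counts[item] = counts.get(item, 0) + c
--     term_dict_true[semester] = counts
--     return term_dict_true
-- ===== Notes on version B (the rewrite author's own statement) =====
-- stated objective: faster
-- what changed: A re-fetches and re-stores the semester dict on every matched prediction, testing membership by scanning t_basket each time; B builds a set of t_basket, filters the predictions, tabulates their frequencies once and merges the table into the semester dict with a single write-back.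
import Mathlib
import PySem

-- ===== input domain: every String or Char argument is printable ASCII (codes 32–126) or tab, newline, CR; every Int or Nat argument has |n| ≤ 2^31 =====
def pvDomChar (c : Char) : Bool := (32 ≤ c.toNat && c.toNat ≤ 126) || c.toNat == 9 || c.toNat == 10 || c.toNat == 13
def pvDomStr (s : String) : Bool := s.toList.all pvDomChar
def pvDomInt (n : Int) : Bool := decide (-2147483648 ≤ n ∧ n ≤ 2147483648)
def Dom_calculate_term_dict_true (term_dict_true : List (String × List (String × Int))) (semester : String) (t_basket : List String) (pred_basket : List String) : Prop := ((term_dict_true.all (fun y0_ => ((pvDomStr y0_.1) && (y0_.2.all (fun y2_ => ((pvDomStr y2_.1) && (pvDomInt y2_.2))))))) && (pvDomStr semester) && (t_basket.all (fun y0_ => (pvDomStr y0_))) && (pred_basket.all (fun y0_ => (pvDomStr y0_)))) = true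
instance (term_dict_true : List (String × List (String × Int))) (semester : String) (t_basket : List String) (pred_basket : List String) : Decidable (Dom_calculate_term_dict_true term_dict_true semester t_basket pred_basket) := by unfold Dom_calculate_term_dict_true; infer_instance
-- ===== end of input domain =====

-- B replaces A's per-item fetch/count/store loop by filter → tabulate → one merged write-back,
-- with a set for the membership test; equivalence is about the RETURN value (both Pythons
-- mutate term_dict_true / its inner dict in place in the same way).

-- ===== PORT A =====
-- literal transliteration of A: one pass over pred_basket; for each item found in t_basket,
-- fetch (or create) the semester's dict, bump the item's count, store the dict back.
-- ('term_dict_true[semester]' is guarded by 'semester in term_dict_true', so getD is exact.)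
def calculate_term_dict_true (term_dict_true : List (String × List (String × Int))) (semester : String) (t_basket : List String) (pred_basket : List String) : List (String × List (String × Int)) :=
  (pred_basket.foldl
    (fun d item =>
      if item ∈ t_basket then
        let count_course : PySem.Dict String Int :=
          if d.contains semester = false then PySem.Dict.mk []
          else PySem.Dict.mk (d.getD semester []);
        d.insert semester
          ((if count_course.contains item = false then count_course.insert item 1
            else count_course.insert item (count_course.getD item 0 + 1)).items)
      else d)
    (PySem.Dict.mk term_dict_true)).items

-- ===== PORT B =====
-- literal transliteration of Source B: set of t_basket, filter, frequency table, single merge.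
def calculate_term_dict_true_alt (term_dict_true : List (String × List (String × Int))) (semester : String) (t_basket : List String) (pred_basket : List String) : List (String × List (String × Int)) :=
  let ts : PySem.Set String := PySem.Set.ofList t_basket;
  let matched := pred_basket.filter (fun i => decide (i ∈ ts));
  if matched = [] then term_dict_true
  else
    let freq : PySem.Dict String Int :=
      matched.foldl (fun f i => f.insert i (f.getD i 0 + 1)) (PySem.Dict.mk []);
    let d := PySem.Dict.mk term_dict_true;
    let counts : PySem.Dict String Int := PySem.Dict.mk (d.getD semester []);
    let counts := freq.items.foldl (fun acc p => acc.insert p.1 (acc.getD p.1 0 + p.2)) counts;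
    (d.insert semester counts.items).items

-- ===== PRECONDITION & SPEC =====
def Spec_calculate_term_dict_true (term_dict_true : List (String × List (String × Int))) (semester : String) (t_basket : List String) (pred_basket : List String) (out : List (String × List (String × Int))) : Prop := out = calculate_term_dict_true_alt term_dict_true semester t_basket pred_basket
instance (term_dict_true : List (String × List (String × Int))) (semester : String) (t_basket : List String) (pred_basket : List String) (out : List (String × List (String × Int))) : Decidable (Spec_calculate_term_dict_true term_dict_true semester t_basket pred_basket out) := by unfold Spec_calculate_term_dict_true; infer_instance

-- ===== CLAIM (what is proved, stated in full; the proofs are below) =====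
def Claim_equal_calculate_term_dict_true : Prop := ∀ (term_dict_true : List (String × List (String × Int))) (semester : String) (t_basket : List String) (pred_basket : List String), Dom_calculate_term_dict_true term_dict_true semester t_basket pred_basket → Spec_calculate_term_dict_true term_dict_true semester t_basket pred_basket (calculate_term_dict_true term_dict_true semester t_basket pred_basket)

-- ===== LEMMAS AND PROOFS =====

-- bump the count of i (A's inner-dict update = one step of B's frequency build)
def pvBump (c : PySem.Dict String Int) (i : String) : PySem.Dict String Int :=
  c.insert i (c.getD i 0 + 1)

-- B's merge loop: add each (key, count) of L onto cc
def pvMerge (cc : PySem.Dict String Int) (L : List (String × Int)) : PySem.Dict String Int :=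
  L.foldl (fun acc p => acc.insert p.1 (acc.getD p.1 0 + p.2)) cc

-- A's loop body on a matched item
def pvStepA (semester : String) (D : PySem.Dict String (List (String × Int))) (i : String) :
    PySem.Dict String (List (String × Int)) :=
  D.insert semester ((pvBump (PySem.Dict.mk (D.getD semester [])) i).items)

-- two inserts at different keys commute when the first key is already present
lemma pv_insert_comm (d : PySem.Dict String Int) (i k : String) (w z : Int)
    (hi : d.contains i = true) (hk : k ≠ i) :
    (d.insert i w).insert k z = (d.insert k z).insert i w := by
  have hki : (k == i) = false := by simp [hk]
  have hik : (i == k) = false := by simp [Ne.symm hk]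
  apply PySem.Dict.ext
  by_cases hck : d.contains k = true
  · have h1 : (d.insert i w).contains k = true := by
      rw [PySem.Dict.contains_insert]; simp [hki, hck]
    have h2 : (d.insert k z).contains i = true := by
      rw [PySem.Dict.contains_insert]; simp [hik, hi]
    rw [PySem.Dict.items_insert_of_contains _ z h1,
        PySem.Dict.items_insert_of_contains _ w hi,
        PySem.Dict.items_insert_of_contains _ w h2,
        PySem.Dict.items_insert_of_contains _ z hck,
        List.map_map, List.map_map]
    apply List.map_congr_left
    intro p _
    by_cases hpi : (p.1 == i) = true <;> by_cases hpk : (p.1 == k) = true <;>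
      simp_all [Function.comp]
  · have hck' : d.contains k = false := by simpa using hck
    have h1 : (d.insert i w).contains k = false := by
      rw [PySem.Dict.contains_insert]; simp [hki, hck']
    have h2 : (d.insert k z).contains i = true := by
      rw [PySem.Dict.contains_insert]; simp [hik, hi]
    rw [PySem.Dict.items_insert_of_not_contains _ z h1,
        PySem.Dict.items_insert_of_contains _ w hi,
        PySem.Dict.items_insert_of_contains _ w h2,
        PySem.Dict.items_insert_of_not_contains _ z hck',
        List.map_append]
    simp [hk]

-- merging pairs whose keys avoid i does not change the count at i
lemma pv_getD_merge (L : List (String × Int)) (acc : PySem.Dict String Int) (i : String)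
    (h : i ∉ L.map Prod.fst) : (pvMerge acc L).getD i 0 = acc.getD i 0 := by
  induction L generalizing acc with
  | nil => rfl
  | cons q L ih =>
    simp only [List.map_cons, List.mem_cons, not_or] at h
    simp only [pvMerge, List.foldl_cons]
    rw [show (L.foldl (fun acc p => acc.insert p.1 (acc.getD p.1 0 + p.2))
        (acc.insert q.1 (acc.getD q.1 0 + q.2))) = pvMerge (acc.insert q.1 (acc.getD q.1 0 + q.2)) L from rfl,
      ih _ h.2, PySem.Dict.getD_insert_of_ne _ _ _ h.1]

-- an insert at a present key i commutes past a merge whose keys avoid i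
lemma pv_merge_insert (L : List (String × Int)) (acc : PySem.Dict String Int) (i : String) (w : Int)
    (h : i ∉ L.map Prod.fst) (hc : acc.contains i = true) :
    pvMerge (acc.insert i w) L = (pvMerge acc L).insert i w := by
  induction L generalizing acc with
  | nil => rfl
  | cons q L ih =>
    simp only [List.map_cons, List.mem_cons, not_or] at h
    have hne : q.1 ≠ i := fun e => h.1 e.symm
    simp only [pvMerge, List.foldl_cons]
    rw [PySem.Dict.getD_insert_of_ne _ _ _ hne,
        pv_insert_comm acc i q.1 w _ hc hne]
    exact ih (acc.insert q.1 (acc.getD q.1 0 + q.2)) h.2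
      (by rw [PySem.Dict.contains_insert]; simp [hc])

-- merging an item list with the value at i bumped = merging, then bumping
lemma pv_merge_map_bump (L : List (String × Int)) (cc : PySem.Dict String Int) (i : String) (v : Int)
    (hnd : (L.map Prod.fst).Nodup) (hmem : (i, v) ∈ L) :
    pvMerge cc (L.map (fun p => if (p.1 == i) = true then (i, v + 1) else p))
      = pvBump (pvMerge cc L) i := by
  induction L generalizing cc with
  | nil => cases hmem
  | cons q L ih =>
    simp only [List.map_cons, List.nodup_cons] at hnd
    by_cases hq : q.1 = i
    · have hqv : q = (i, v) := by
        rcases List.mem_cons.mp hmem with h | hm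
        · exact h.symm
        · exact absurd (List.mem_map.mpr ⟨(i, v), hm, rfl⟩) (hq ▸ hnd.1)
      subst hqv
      have hni : i ∉ L.map Prod.fst := hnd.1
      have htl : L.map (fun p => if (p.1 == i) = true then (i, v + 1) else p) = L := by
        conv_rhs => rw [← List.map_id L]
        apply List.map_congr_left
        intro p hp
        have hpne : (p.1 == i) = false := by
          simp only [beq_eq_false_iff_ne, ne_eq]
          exact fun e => hni (List.mem_map.mpr ⟨p, hp, e⟩)
        simp [hpne]
      simp only [List.map_cons, htl, BEq.rfl, if_true]
      show pvMerge (cc.insert i (cc.getD i 0 + (v + 1))) L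
        = pvBump (pvMerge (cc.insert i (cc.getD i 0 + v)) L) i
      rw [pvBump, pv_getD_merge L _ i hni, PySem.Dict.getD_insert_self,
          ← pv_merge_insert L _ i _ hni (by rw [PySem.Dict.contains_insert]; simp),
          PySem.Dict.insert_insert_self, add_assoc]
    · have hm : (i, v) ∈ L := by
        rcases List.mem_cons.mp hmem with h | hm
        · exact absurd (congrArg Prod.fst h.symm) hq
        · exact hm
      have hqne : (q.1 == i) = false := by simp [hq]
      simp only [List.map_cons, hqne]
      show pvMerge (cc.insert q.1 (cc.getD q.1 0 + q.2)) (L.map _)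
        = pvBump (pvMerge (cc.insert q.1 (cc.getD q.1 0 + q.2)) L) i
      exact ih _ hnd.2 hm

-- merging a bumped frequency dict = merging, then bumping
lemma pv_merge_bump (C cc : PySem.Dict String Int) (i : String) (hnd : C.keys.Nodup) :
    pvMerge cc ((pvBump C i).items) = pvBump (pvMerge cc C.items) i := by
  by_cases hc : C.contains i = true
  · have hik : i ∈ C.keys := (PySem.Dict.contains_iff_mem_keys _ _).mp hc
    have : ∃ v, (i, v) ∈ C.items := by
      simp only [PySem.Dict.keys] at hik
      rcases List.mem_map.mp hik with ⟨p, hp, he⟩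
      exact ⟨p.2, by rw [← he]; simpa using hp⟩
    obtain ⟨v, hv⟩ := this
    have hgd : C.getD i 0 = v := PySem.Dict.getD_of_mem_items C hv hnd 0
    rw [pvBump, PySem.Dict.items_insert_of_contains _ _ hc, hgd]
    exact pv_merge_map_bump C.items cc i v (by simpa [PySem.Dict.keys] using hnd) hv
  · have hc' : C.contains i = false := by simpa using hc
    rw [pvBump, PySem.Dict.items_insert_of_not_contains _ _ hc',
        PySem.Dict.getD_of_not_contains _ _ hc']
    simp only [pvMerge, List.foldl_append, List.foldl_cons, List.foldl_nil, zero_add]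
    rfl

-- B's tabulate-then-merge = folding the bumps directly into cc (the heart of the proof)
lemma pv_merge_foldl (m : List String) (C cc : PySem.Dict String Int) (hnd : C.keys.Nodup) :
    pvMerge cc ((m.foldl pvBump C).items) = m.foldl pvBump (pvMerge cc C.items) := by
  induction m generalizing C with
  | nil => rfl
  | cons i m ih =>
    simp only [List.foldl_cons]
    rw [ih (pvBump C i) (PySem.Dict.nodup_keys_insert _ _ _ hnd), pv_merge_bump C cc i hnd]

-- A's outer loop over a non-empty matched list collapses to one insert of the folded inner dict
lemma pvA_foldl (semester : String) (m : List String) (D : PySem.Dict String (List (String × Int)))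
    (hm : m ≠ []) :
    m.foldl (pvStepA semester) D
      = D.insert semester ((m.foldl pvBump (PySem.Dict.mk (D.getD semester []))).items) := by
  induction m generalizing D with
  | nil => exact absurd rfl hm
  | cons i m ih =>
    by_cases h : m = []
    · subst h; rfl
    · simp only [List.foldl_cons]
      rw [ih (pvStepA semester D i) h]
      rw [show pvStepA semester D i
            = D.insert semester ((pvBump (PySem.Dict.mk (D.getD semester [])) i).items) from rfl,
          PySem.Dict.getD_insert_self, PySem.Dict.insert_insert_self]

-- A's port as a fold of pvStepA over the matched sublist
lemma pvA_eq (td : List (String × List (String × Int))) (semester : String) (tb pb : List String) :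
    calculate_term_dict_true td semester tb pb
      = ((pb.filter (fun i => decide (i ∈ tb))).foldl (pvStepA semester) (PySem.Dict.mk td)).items := by
  unfold calculate_term_dict_true
  rw [List.foldl_filter]
  have hfun : (fun (d : PySem.Dict String (List (String × Int))) (item : String) =>
      if item ∈ tb then
        let count_course : PySem.Dict String Int :=
          if d.contains semester = false then PySem.Dict.mk []
          else PySem.Dict.mk (d.getD semester []);
        d.insert semester
          ((if count_course.contains item = false then count_course.insert item 1
            else count_course.insert item (count_course.getD item 0 + 1)).items)
      else d)
      = (fun (d : PySem.Dict String (List (String × Int))) (item : String) =>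
          if decide (item ∈ tb) = true then pvStepA semester d item else d) := by
    funext d item
    by_cases hit : item ∈ tb
    · have hcc0 : (if d.contains semester = false then PySem.Dict.mk ([] : List (String × Int))
          else PySem.Dict.mk (d.getD semester [])) = PySem.Dict.mk (d.getD semester []) := by
        by_cases hs : d.contains semester = false
        · rw [if_pos hs, PySem.Dict.getD_of_not_contains _ _ hs]
        · rw [if_neg hs]
      simp only [hit, decide_true, if_true, hcc0]
      by_cases hcc : (PySem.Dict.mk (d.getD semester [])).contains item = false
      · rw [if_pos hcc, pvStepA, pvBump,
            PySem.Dict.getD_of_not_contains _ _ hcc, zero_add]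
      · rw [if_neg hcc, pvStepA, pvBump]
    · simp only [hit, decide_false, if_false, Bool.false_eq_true]
  rw [hfun]

-- B's port, its lets and lambdas rewritten to the named helpers (definitionally)
lemma pvB_eq (td : List (String × List (String × Int))) (semester : String) (tb pb : List String) :
    calculate_term_dict_true_alt td semester tb pb
      = (if (pb.filter fun i => decide (i ∈ PySem.Set.ofList tb)) = [] then td
         else ((PySem.Dict.mk td).insert semester
           (pvMerge (PySem.Dict.mk ((PySem.Dict.mk td).getD semester []))
             (((pb.filter fun i => decide (i ∈ PySem.Set.ofList tb)).foldl pvBump (PySem.Dict.mk [])).items)).items).items) := rfl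

-- set membership = list membership
lemma pv_filter_eq (tb pb : List String) :
    (pb.filter fun i => decide (i ∈ PySem.Set.ofList tb)) = (pb.filter fun i => decide (i ∈ tb)) := by
  apply List.filter_congr
  intro i _
  simp [PySem.Set.mem_ofList]

-- ===== VERDICT (by name: the statement is the Claim_ definition above) =====
theorem calculate_term_dict_true_spec : Claim_equal_calculate_term_dict_true := by
  intro td semester tb pb _
  unfold Spec_calculate_term_dict_true
  rw [pvB_eq, pv_filter_eq, pvA_eq]
  by_cases hm : (pb.filter fun i => decide (i ∈ tb)) = []
  · rw [if_pos hm, hm]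
    rfl
  · rw [if_neg hm, pvA_foldl semester _ _ hm]
    congr 2
    rw [pv_merge_foldl _ (PySem.Dict.mk []) _ (by simp [PySem.Dict.keys])]
    rfl
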